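-- pv_equiv track=rewrite | github.com/AnandSaurabhShah/ET_GenAI_sample | src/features/meeting_intelligence.py | _categorize_action
-- ===== SOURCE A (Python) =====
-- def _categorize_action(description: str) -> str:
--     """Categorize action item"""
--     desc_lower = description.lower()
--
--     if any(word in desc_lower for word in ["document", "write", "create", "prepare"]):
--         return "Documentation"
--     elif any(word in desc_lower for word in ["send", "email", "communicate", "inform"]):
--         return "Communication"
--     elif any(word in desc_lower for word in ["review", "check", "verify", "validate"]):
--         return "Review"
--     elif any(word in desc_lower for word in ["develop", "code", "implement", "build"]):
--         return "Development"
--     elif any(word in desc_lower for word in ["test", "qa", "quality"]):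
--         return "Testing"
--     elif any(word in desc_lower for word in ["budget", "finance", "cost"]):
--         return "Finance"
--     else:
--         return "General"
-- ===== SOURCE B (Python) =====
-- _KEYWORD_PRIORITY = {
--     "document": 0, "write": 0, "create": 0, "prepare": 0,
--     "send": 1, "email": 1, "communicate": 1, "inform": 1,
--     "review": 2, "check": 2, "verify": 2, "validate": 2,
--     "develop": 3, "code": 3, "implement": 3, "build": 3,
--     "test": 4, "qa": 4, "quality": 4,
--     "budget": 5, "finance": 5, "cost": 5,
-- }
--
-- _CATEGORY_NAMES = ["Documentation", "Communication", "Review", "Development",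
--                    "Testing", "Finance", "General"]
--
--
-- def _categorize_action(description: str) -> str:
--     """Categorize action item"""
--     desc_lower = description.lower()
--     best = 6
--     for word, priority in _KEYWORD_PRIORITY.items():
--         if priority < best and word in desc_lower:
--             best = priority
--     return _CATEGORY_NAMES[best]
-- ===== Notes on version B (the rewrite author's own statement) =====
-- stated objective: alternative
-- what changed: Replaces the if/elif cascade of per-category any() substring checks (first match, early return) with a single accumulator pass over a flat keyword-to-priority map that keeps the minimum matched priority and finally indexes a category-name table.
import Mathlib
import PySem

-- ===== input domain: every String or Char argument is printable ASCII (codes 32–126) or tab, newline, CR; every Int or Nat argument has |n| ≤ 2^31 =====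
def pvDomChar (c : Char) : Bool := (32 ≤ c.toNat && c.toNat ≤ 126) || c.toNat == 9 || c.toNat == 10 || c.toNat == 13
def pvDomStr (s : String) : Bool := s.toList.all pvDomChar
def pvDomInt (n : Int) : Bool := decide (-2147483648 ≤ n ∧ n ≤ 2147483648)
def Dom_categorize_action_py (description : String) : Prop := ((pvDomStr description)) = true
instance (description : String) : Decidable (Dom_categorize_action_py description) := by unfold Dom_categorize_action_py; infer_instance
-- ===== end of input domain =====

-- B replaces A's first-match if/elif cascade by a single min-priority accumulator pass over a flat keyword->priority map plus a final name-table index (alternative decomposition, same cost).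


-- ===== PORT A =====
def categorize_action_py (description : String) : String :=
  let desc_lower := PySem.Str.lower description
  if (["document", "write", "create", "prepare"].any (fun word => PySem.Str.isIn word desc_lower)) then
    "Documentation"
  else if (["send", "email", "communicate", "inform"].any (fun word => PySem.Str.isIn word desc_lower)) then
    "Communication"
  else if (["review", "check", "verify", "validate"].any (fun word => PySem.Str.isIn word desc_lower)) then
    "Review"
  else if (["develop", "code", "implement", "build"].any (fun word => PySem.Str.isIn word desc_lower)) then
    "Development"
  else if (["test", "qa", "quality"].any (fun word => PySem.Str.isIn word desc_lower)) then
    "Testing"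
  else if (["budget", "finance", "cost"].any (fun word => PySem.Str.isIn word desc_lower)) then
    "Finance"
  else
    "General"

-- ===== PORT B =====
-- flat keyword -> priority map (a Python dict iterated in insertion order)
def keywordPriority : List (String × Int) :=
  [("document", 0), ("write", 0), ("create", 0), ("prepare", 0),
   ("send", 1), ("email", 1), ("communicate", 1), ("inform", 1),
   ("review", 2), ("check", 2), ("verify", 2), ("validate", 2),
   ("develop", 3), ("code", 3), ("implement", 3), ("build", 3),
   ("test", 4), ("qa", 4), ("quality", 4),
   ("budget", 5), ("finance", 5), ("cost", 5)]

def categoryNames : List String :=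
  ["Documentation", "Communication", "Review", "Development", "Testing", "Finance", "General"]

def categorize_action_py_alt (description : String) : String :=
  let desc_lower := PySem.Str.lower description
  let best := keywordPriority.foldl
    (fun best p => if p.2 < best ∧ PySem.Str.isIn p.1 desc_lower = true then p.2 else best) 6
  -- Python `_CATEGORY_NAMES[best]`; best is always in [0,6] so the lookup never fails
  (PySem.List.pyGet? categoryNames best).getD ""

-- ===== PRECONDITION & SPEC =====
def Spec_categorize_action_py (description : String) (out : String) : Prop := out = categorize_action_py_alt description
instance (description : String) (out : String) : Decidable (Spec_categorize_action_py description out) := by unfold Spec_categorize_action_py; infer_instance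

-- ===== CLAIM (what is proved, stated in full; the proofs are below) =====
def Claim_equal_categorize_action_py : Prop := ∀ (description : String), Dom_categorize_action_py description → Spec_categorize_action_py description (categorize_action_py description)

-- ===== LEMMAS AND PROOFS =====

-- the loop body of B's fold
def pvF (L : String) : Int → (String × Int) → Int :=
  fun best p => if p.2 < best ∧ PySem.Str.isIn p.1 L = true then p.2 else best

lemma pvF_absorb (L : String) (b : Int) (l : List (String × Int))
    (h : ∀ p ∈ l, ¬ p.2 < b) : l.foldl (pvF L) b = b := by
  induction l with
  | nil => rfl
  | cons p l ih =>
    have hp := h p (List.mem_cons_self ..)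
    have hstep : pvF L b p = b := by simp [pvF, hp]
    rw [List.foldl_cons, hstep]
    exact ih (fun q hq => h q (List.mem_cons_of_mem _ hq))

lemma pvF_group (L : String) (k : Int) (ws : List String) :
    ∀ b : Int, k < b →
    (ws.map (fun w => (w, k))).foldl (pvF L) b
      = if ws.any (fun w => PySem.Str.isIn w L) then k else b := by
  induction ws with
  | nil => intro b _; simp
  | cons w ws ih =>
    intro b hb
    by_cases hw : PySem.Str.isIn w L = true
    · have hw' : PySem.Chars.isIn w.toList L.toList = true := by simpa using hw
      have hstep : pvF L b (w, k) = k := by simp [pvF, hb, hw']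
      have habs : (ws.map (fun w => (w, k))).foldl (pvF L) k = k := by
        apply pvF_absorb
        intro p hp
        simp only [List.mem_map] at hp
        obtain ⟨w', _, rfl⟩ := hp
        omega
      simp [List.foldl_cons, hstep, habs, hw']
    · have hw' : PySem.Chars.isIn w.toList L.toList = false := by
        simpa using hw
      have hstep : pvF L b (w, k) = b := by simp [pvF, hw']
      simp [List.foldl_cons, hstep, ih b hb, hw']

-- groups of keywords with their priority, in B's scan order
def pvGroups : List (List String × Int) :=
  [(["document", "write", "create", "prepare"], 0),
   (["send", "email", "communicate", "inform"], 1),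
   (["review", "check", "verify", "validate"], 2),
   (["develop", "code", "implement", "build"], 3),
   (["test", "qa", "quality"], 4),
   (["budget", "finance", "cost"], 5)]

lemma pvF_groups (L : String) :
    ∀ (gs : List (List String × Int)) (b : Int),
    (∀ g ∈ gs, g.2 < b) →
    gs.Pairwise (fun g h => g.2 ≤ h.2) →
    (gs.flatMap (fun g => g.1.map (fun w => (w, g.2)))).foldl (pvF L) b
      = ((gs.find? (fun g => g.1.any (fun w => PySem.Str.isIn w L))).map (·.2)).getD b := by
  intro gs
  induction gs with
  | nil => intro b _ _; rfl
  | cons g gs ih =>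
    intro b hb hpw
    rw [List.flatMap_cons, List.foldl_append,
        pvF_group L g.2 g.1 b (hb g (List.mem_cons_self ..))]
    by_cases hg : (g.1.any (fun w => PySem.Str.isIn w L)) = true
    · have hg' : (g.1.any (fun w => PySem.Chars.isIn w.toList L.toList)) = true := by
        simpa using hg
      have habs : (gs.flatMap (fun g' => g'.1.map (fun w => (w, g'.2)))).foldl (pvF L) g.2 = g.2 := by
        apply pvF_absorb
        intro p hp
        simp only [List.mem_flatMap, List.mem_map] at hp
        obtain ⟨g', hg'', w', _, rfl⟩ := hp
        have := (List.pairwise_cons.mp hpw).1 g' hg''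
        omega
      simp [hg', habs, List.find?]
    · have hg' : (g.1.any (fun w => PySem.Chars.isIn w.toList L.toList)) = false := by
        simpa using hg
      rw [if_neg hg]
      rw [List.find?_cons_of_neg (by simpa using hg)]
      exact ih b (fun g' hg'' => hb g' (List.mem_cons_of_mem _ hg''))
        (List.pairwise_cons.mp hpw).2

lemma keywordPriority_flat :
    keywordPriority = pvGroups.flatMap (fun g => g.1.map (fun w => (w, g.2))) := by
  rfl

theorem categorize_action_py_eq (d : String) :
    categorize_action_py d = categorize_action_py_alt d := by
  have hfold := pvF_groups (PySem.Str.lower d) pvGroups 6 (by decide) (by decide)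
  unfold pvF at hfold
  simp only [PySem.Str.isIn_eq, PySem.Str.toList_lower] at hfold
  simp only [categorize_action_py, categorize_action_py_alt, keywordPriority_flat,
    PySem.Str.isIn_eq, PySem.Str.toList_lower]
  rw [hfold]
  unfold pvGroups
  by_cases h0 : (["document", "write", "create", "prepare"].any
      (fun w => PySem.Chars.isIn w.toList (PySem.Chars.lower d.toList))) = true
  · simp [h0, categoryNames, PySem.List.pyGet?, PySem.List.pyIdx?]
  · by_cases h1 : (["send", "email", "communicate", "inform"].any
        (fun w => PySem.Chars.isIn w.toList (PySem.Chars.lower d.toList))) = true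
    · simp [h0, h1, categoryNames, PySem.List.pyGet?, PySem.List.pyIdx?]
    · by_cases h2 : (["review", "check", "verify", "validate"].any
          (fun w => PySem.Chars.isIn w.toList (PySem.Chars.lower d.toList))) = true
      · simp [h0, h1, h2, categoryNames, PySem.List.pyGet?, PySem.List.pyIdx?]
      · by_cases h3 : (["develop", "code", "implement", "build"].any
            (fun w => PySem.Chars.isIn w.toList (PySem.Chars.lower d.toList))) = true
        · simp [h0, h1, h2, h3, categoryNames, PySem.List.pyGet?, PySem.List.pyIdx?]
        · by_cases h4 : (["test", "qa", "quality"].any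
              (fun w => PySem.Chars.isIn w.toList (PySem.Chars.lower d.toList))) = true
          · simp [h0, h1, h2, h3, h4, categoryNames, PySem.List.pyGet?, PySem.List.pyIdx?]
          · by_cases h5 : (["budget", "finance", "cost"].any
                (fun w => PySem.Chars.isIn w.toList (PySem.Chars.lower d.toList))) = true
            · simp [h0, h1, h2, h3, h4, h5, categoryNames, PySem.List.pyGet?, PySem.List.pyIdx?]
            · simp [h0, h1, h2, h3, h4, h5, categoryNames, PySem.List.pyGet?, PySem.List.pyIdx?]

-- ===== VERDICT (by name: the statement is the Claim_ definition above) =====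
theorem categorize_action_py_spec : Claim_equal_categorize_action_py := by
  intro d _
  exact categorize_action_py_eq d
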